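-- pv_equiv track=rewrite | github.com/Viagounet/StructGPT | markdown_ui.py | split_markdown
-- ===== SOURCE A (Python) =====
-- def split_markdown(text):
--     # Split the text by lines
--     lines = text.split('\n')
--
--     # Initialize variables
--     parts = []
--     current_part = []
--
--     # Iterate through each line
--     for line in lines:
--         # Check if the line is a level 1 title
--         if line.startswith('### '):
--             # If there's content in the current part, add it to the parts list
--             if current_part:
--                 parts.append('\n'.join(current_part))
--                 current_part = []
--         # Add the line to the current part
--         current_part.append(line)
--
--     # Add the last part if it exists
--     if current_part:
--         parts.append('\n'.join(current_part))
--
--     return parts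
-- ===== SOURCE B (Python) =====
-- def split_markdown(text):
--     lines = text.split('\n')
--     heads = [i for i, line in enumerate(lines) if line.startswith('### ')]
--     cuts = heads if heads[:1] == [0] else [0] + heads
--     bounds = cuts + [len(lines)]
--     return ['\n'.join(lines[a:b]) for a, b in zip(bounds, bounds[1:])]
-- ===== Notes on version B (the rewrite author's own statement) =====
-- stated objective: alternative
-- what changed: Replaces A's accumulate-and-flush single pass (buffer list flushed at each header) with an index-then-slice decomposition: collect header line indices, form cut points {0} union headers plus the end, and emit joined slices between consecutive cuts.
import Mathlib
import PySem

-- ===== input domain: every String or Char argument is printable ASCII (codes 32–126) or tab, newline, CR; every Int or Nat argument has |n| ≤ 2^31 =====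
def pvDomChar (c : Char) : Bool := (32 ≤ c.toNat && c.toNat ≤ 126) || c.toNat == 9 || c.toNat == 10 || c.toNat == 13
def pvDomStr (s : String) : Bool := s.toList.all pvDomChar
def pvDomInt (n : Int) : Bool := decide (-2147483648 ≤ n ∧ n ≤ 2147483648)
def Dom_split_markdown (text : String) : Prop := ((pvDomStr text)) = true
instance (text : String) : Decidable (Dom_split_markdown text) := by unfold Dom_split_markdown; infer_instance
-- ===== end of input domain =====

-- B replaces A's accumulate-and-flush pass with an index-then-slice decomposition (alternative, same cost).

-- ===== PORT A =====
-- literal transliteration: buffer 'current_part', flushed to 'parts' at each '### ' header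
def split_markdown (text : String) : List String :=
  let lines := (PySem.Str.split? text "\n").getD []
  let st := lines.foldl (fun (st : List String × List String) line =>
      let st' := if PySem.Str.startswith line "### " then
                   (if st.2 ≠ [] then (st.1 ++ [PySem.Str.join "\n" st.2], ([] : List String)) else st)
                 else st
      (st'.1, st'.2 ++ [line])) ([], [])
  if st.2 ≠ [] then st.1 ++ [PySem.Str.join "\n" st.2] else st.1

-- ===== PORT B =====
-- literal transliteration of Source B: header indices → cut points → joined slices
def split_markdown_alt (text : String) : List String :=
  let lines := (PySem.Str.split? text "\n").getD []
  let heads := ((PySem.List.enumerate lines).filter (fun p => PySem.Str.startswith p.2 "### ")).map Prod.fst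
  let cuts := if heads.take 1 = [(0 : Int)] then heads else 0 :: heads
  let bounds := cuts ++ [(lines.length : Int)]
  (bounds.zip bounds.tail).map (fun p => PySem.Str.join "\n" (PySem.List.slice lines (some p.1) (some p.2)))

-- ===== PRECONDITION & SPEC =====
def Spec_split_markdown (text : String) (out : List String) : Prop := out = split_markdown_alt text
instance (text : String) (out : List String) : Decidable (Spec_split_markdown text out) := by unfold Spec_split_markdown; infer_instance

-- ===== CLAIM (what is proved, stated in full; the proofs are below) =====
def Claim_equal_split_markdown : Prop := ∀ (text : String), Dom_split_markdown text → Spec_split_markdown text (split_markdown text)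

-- ===== LEMMAS AND PROOFS =====

def pvHdr (s : String) : Bool := PySem.Str.startswith s "### "

-- reference grouping: current chunk + remaining lines → chunks (A's shape)
def pvGrp (cur : List String) : List String → List (List String)
  | [] => [cur]
  | l :: ls => if pvHdr l then cur :: pvGrp [l] ls else pvGrp (cur ++ [l]) ls

-- reference chunking by absolute cut positions (B's shape)
def pvChunks (xs : List String) (a : Nat) : List Nat → List (List String)
  | [] => [xs.drop a]
  | b :: bs => ((xs.drop a).take (b - a)) :: pvChunks xs b bs

-- header indices of a line list
def pvHIdx : List String → List Nat
  | [] => []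
  | l :: ls => (if pvHdr l then [0] else []) ++ (pvHIdx ls).map (· + 1)

theorem pvGo_ne_nil (sep : List Char) (fuel : Nat) (l cur : List Char) (acc : List (List Char)) :
    PySem.Chars.splitOn.go sep fuel l cur acc ≠ [] := by
  induction fuel generalizing l cur acc with
  | zero => simp [PySem.Chars.splitOn.go]
  | succ fuel ih =>
    cases l with
    | nil => simp [PySem.Chars.splitOn.go]
    | cons c rest =>
      rw [PySem.Chars.splitOn.go]
      split
      · exact ih _ _ _
      · exact ih _ _ _

theorem pvLines_ne_nil (text : String) : (PySem.Str.split? text "\n").getD [] ≠ [] := by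
  simp only [PySem.Str.split?, PySem.Chars.split?]
  have h : ("\n".toList).isEmpty = false := by decide
  simp only [h, Bool.false_eq_true, if_false, Option.map_some, Option.getD_some]
  simp only [PySem.Chars.splitOn]
  intro hcon
  exact pvGo_ne_nil _ _ _ _ _ (by simpa using hcon)

-- A's fold with nonempty buffer computes pvGrp
theorem pvFoldA (ls : List String) : ∀ (parts cur : List String), cur ≠ [] →
    (let st := ls.foldl (fun (st : List String × List String) line =>
      let st' := if PySem.Str.startswith line "### " then
                   (if st.2 ≠ [] then (st.1 ++ [PySem.Str.join "\n" st.2], ([] : List String)) else st)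
                 else st
      (st'.1, st'.2 ++ [line])) (parts, cur)
     if st.2 ≠ [] then st.1 ++ [PySem.Str.join "\n" st.2] else st.1)
    = parts ++ (pvGrp cur ls).map (PySem.Str.join "\n") := by
  induction ls with
  | nil => intro parts cur hc; simp [pvGrp, hc]
  | cons l ls ih =>
    intro parts cur hc
    by_cases h : pvHdr l = true
    · simp only [List.foldl_cons, pvGrp, h, if_true]
      have : PySem.Str.startswith l "### " = true := h
      simp only [this, hc, ne_eq, not_false_iff, if_pos trivial]
      have := ih (parts ++ [PySem.Str.join "\n" cur]) ([] ++ [l]) (by simp)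
      simp only [List.nil_append] at this
      simp only [this, List.map_cons, List.append_assoc, List.cons_append, List.nil_append]
    · have hb : PySem.Str.startswith l "### " = false := by
        simpa [pvHdr] using h
      simp only [List.foldl_cons, pvGrp, hb, Bool.false_eq_true, if_false, h]
      exact ih parts (cur ++ [l]) (by simp)

-- B's header-index pass computes pvHIdx (shifted by the enumerate start)
theorem pvHeadsEq (ls : List String) : ∀ (s : Int),
    ((PySem.List.enumerate ls s).filter (fun p => PySem.Str.startswith p.2 "### ")).map Prod.fst
    = (pvHIdx ls).map (fun n : Nat => s + (n : Int)) := by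
  induction ls with
  | nil => intro s; simp [pvHIdx, PySem.List.enumerate_nil]
  | cons l ls ih =>
    intro s
    rw [PySem.List.enumerate_cons, List.filter_cons]
    by_cases hb : PySem.Str.startswith l "### " = true
    · have h : pvHdr l = true := hb
      simp only [hb, if_true, List.map_cons, ih (s + 1), pvHIdx, h, List.cons_append,
        List.nil_append, List.map_map]
      congr 1
      · simp
      · apply List.map_congr_left
        intro n _
        simp only [Function.comp_apply]
        push_cast
        ring
    · have h : pvHdr l = false := by simpa [pvHdr] using hb
      simp only [hb, Bool.false_eq_true, if_false, ih (s + 1), pvHIdx, h, List.nil_append,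
        List.map_map]
      apply List.map_congr_left
      intro n _
      simp only [Function.comp_apply]
      push_cast
      ring

-- zip-of-bounds slicing computes pvChunks
theorem pvZipSlice (bs : List Nat) : ∀ (a : Nat) (xs : List String),
    ((((a :: (bs ++ [xs.length])).map (fun n : Nat => (n : Int))).zip
       (((bs ++ [xs.length])).map (fun n : Nat => (n : Int)))).map
      (fun p => PySem.Str.join "\n" (PySem.List.slice xs (some p.1) (some p.2))))
    = (pvChunks xs a bs).map (PySem.Str.join "\n") := by
  induction bs with
  | nil =>
    intro a xs
    simp only [List.nil_append, List.map_cons, List.map_nil, List.zip_cons_cons, List.zip_nil_right,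
      pvChunks, PySem.List.slice_natCast]
    have : (xs.drop a).take (xs.length - a) = xs.drop a :=
      List.take_of_length_le (by simp)
    rw [this]
  | cons b bs ih =>
    intro a xs
    simp only [List.cons_append, List.map_cons, List.zip_cons_cons, List.map_cons, pvChunks,
      PySem.List.slice_natCast]
    congr 1
    exact (by simpa using ih b xs)

-- shifting all cuts by a common prefix
theorem pvChunksShift (bs : List Nat) : ∀ (pre xs : List String) (a : Nat),
    pvChunks (pre ++ xs) (a + pre.length) (bs.map (· + pre.length)) = pvChunks xs a bs := by
  have hdrop : ∀ (pre xs : List String) (a : Nat),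
      (pre ++ xs).drop (a + pre.length) = xs.drop a := by
    intro pre xs a
    rw [Nat.add_comm, List.drop_append]
    have h1 : List.drop (pre.length + a) pre = [] := List.drop_eq_nil_of_le (by omega)
    have h2 : pre.length + a - pre.length = a := by omega
    rw [h1, h2, List.nil_append]
  induction bs with
  | nil =>
    intro pre xs a
    simp [pvChunks, hdrop]
  | cons b bs ih =>
    intro pre xs a
    simp only [List.map_cons, pvChunks, ih]
    congr 1
    rw [hdrop]
    congr 1
    omega

-- pvGrp equals chunking at the (shifted) header indices
theorem pvGrpChunks (ls : List String) : ∀ (cur : List String), cur ≠ [] →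
    pvGrp cur ls = pvChunks (cur ++ ls) 0 ((pvHIdx ls).map (· + cur.length)) := by
  induction ls with
  | nil => intro cur hc; simp [pvGrp, pvHIdx, pvChunks]
  | cons l ls ih =>
    intro cur hc
    by_cases h : pvHdr l = true
    · simp only [pvGrp, h, if_true, pvHIdx, List.cons_append, List.nil_append, List.map_cons,
        List.map_map, pvChunks, List.drop_zero, Nat.zero_add]
      rw [Nat.sub_zero, List.take_left]
      congr 1
      have h1 := ih [l] (by simp)
      simp only [List.singleton_append, List.length_singleton] at h1
      have h2 := pvChunksShift ((pvHIdx ls).map (· + 1)) cur (l :: ls) 0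
      simp only [Nat.zero_add] at h2
      rw [h1, ← h2, List.map_map]
    · have hf : pvHdr l = false := by simpa using h
      simp only [pvGrp, hf, Bool.false_eq_true, if_false, pvHIdx, List.nil_append, List.map_map]
      rw [ih (cur ++ [l]) (by simp)]
      have hassoc : (cur ++ [l]) ++ ls = cur ++ l :: ls := by simp
      rw [hassoc]
      congr 1
      apply List.map_congr_left
      intro n _
      simp only [Function.comp_apply, List.length_append, List.length_cons, List.length_nil]
      omega

theorem pvMain (lines : List String) (hne : lines ≠ []) :
    (let st := lines.foldl (fun (st : List String × List String) line =>
      let st' := if PySem.Str.startswith line "### " then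
                   (if st.2 ≠ [] then (st.1 ++ [PySem.Str.join "\n" st.2], ([] : List String)) else st)
                 else st
      (st'.1, st'.2 ++ [line])) ([], [])
     if st.2 ≠ [] then st.1 ++ [PySem.Str.join "\n" st.2] else st.1)
    = (let heads := ((PySem.List.enumerate lines).filter (fun p => PySem.Str.startswith p.2 "### ")).map Prod.fst
       let cuts := if heads.take 1 = [(0 : Int)] then heads else 0 :: heads
       let bounds := cuts ++ [(lines.length : Int)]
       (bounds.zip bounds.tail).map (fun p => PySem.Str.join "\n" (PySem.List.slice lines (some p.1) (some p.2)))) := by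
  obtain ⟨l, ls, rfl⟩ := List.exists_cons_of_ne_nil hne
  dsimp only
  -- A side: first step leaves ([], [l]) whatever l is, then pvFoldA
  have hA : (let st := (l :: ls).foldl (fun (st : List String × List String) line =>
      let st' := if PySem.Str.startswith line "### " then
                   (if st.2 ≠ [] then (st.1 ++ [PySem.Str.join "\n" st.2], ([] : List String)) else st)
                 else st
      (st'.1, st'.2 ++ [line])) ([], [])
     if st.2 ≠ [] then st.1 ++ [PySem.Str.join "\n" st.2] else st.1)
      = (pvGrp [l] ls).map (PySem.Str.join "\n") := by
    have step : (l :: ls).foldl (fun (st : List String × List String) line =>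
      let st' := if PySem.Str.startswith line "### " then
                   (if st.2 ≠ [] then (st.1 ++ [PySem.Str.join "\n" st.2], ([] : List String)) else st)
                 else st
      (st'.1, st'.2 ++ [line])) ([], [])
        = ls.foldl (fun (st : List String × List String) line =>
      let st' := if PySem.Str.startswith line "### " then
                   (if st.2 ≠ [] then (st.1 ++ [PySem.Str.join "\n" st.2], ([] : List String)) else st)
                 else st
      (st'.1, st'.2 ++ [line])) ([], [l]) := by
      simp only [List.foldl_cons]
      congr 1
      by_cases h : PySem.Str.startswith l "### " = true <;> simp
    simp only [step]
    have := pvFoldA ls [] [l] (by simp)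
    simpa using this
  rw [hA]
  -- B side: heads, cuts, bounds in terms of pvHIdx
  have hheads : ((PySem.List.enumerate (l :: ls)).filter (fun p => PySem.Str.startswith p.2 "### ")).map Prod.fst
      = (pvHIdx (l :: ls)).map (fun n : Nat => (n : Int)) := by
    have := pvHeadsEq (l :: ls) 0
    simpa using this
  rw [hheads]
  have hcuts : (if ((pvHIdx (l :: ls)).map (fun n : Nat => (n : Int))).take 1 = [(0 : Int)]
                then (pvHIdx (l :: ls)).map (fun n : Nat => (n : Int))
                else 0 :: (pvHIdx (l :: ls)).map (fun n : Nat => (n : Int)))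
      = (0 :: (pvHIdx ls).map (· + 1)).map (fun n : Nat => (n : Int)) := by
    by_cases h : pvHdr l = true
    · have hform : pvHIdx (l :: ls) = 0 :: (pvHIdx ls).map (· + 1) := by
        simp [pvHIdx, h]
      rw [hform]
      simp
    · have hform : pvHIdx (l :: ls) = (pvHIdx ls).map (· + 1) := by
        simp [pvHIdx, h]
      rw [hform]
      have hne1 : (((pvHIdx ls).map (· + 1)).map (fun n : Nat => (n : Int))).take 1 ≠ [(0 : Int)] := by
        cases hh : pvHIdx ls with
        | nil => simp
        | cons n t =>
          simp only [List.map_cons, List.take_succ_cons, List.take_zero]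
          intro hcon
          have : ((n + 1 : Nat) : Int) = 0 := by simpa using hcon
          omega
      rw [if_neg hne1]
      simp
  rw [hcuts]
  -- assemble: bounds = map cast (0 :: map(+1) ++ [len]), apply pvZipSlice then pvGrpChunks
  have hlen : ((l :: ls).length : Int) = ((((l :: ls).length : Nat) : Int)) := rfl
  have hbounds : ((0 :: (pvHIdx ls).map (· + 1)).map (fun n : Nat => (n : Int))) ++ [((l :: ls).length : Int)]
      = (0 :: ((pvHIdx ls).map (· + 1) ++ [(l :: ls).length])).map (fun n : Nat => (n : Int)) := by
    simp
  rw [hbounds]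
  have htail : ((0 :: ((pvHIdx ls).map (· + 1) ++ [(l :: ls).length])).map (fun n : Nat => (n : Int))).tail
      = (((pvHIdx ls).map (· + 1) ++ [(l :: ls).length])).map (fun n : Nat => (n : Int)) := by
    simp
  rw [htail]
  rw [pvZipSlice ((pvHIdx ls).map (· + 1)) 0 (l :: ls)]
  have := pvGrpChunks ls [l] (by simp)
  simp only [List.singleton_append, List.length_singleton] at this
  rw [← this]

-- ===== VERDICT (by name: the statement is the Claim_ definition above) =====
theorem split_markdown_spec : Claim_equal_split_markdown := by
  intro text _
  unfold Spec_split_markdown split_markdown split_markdown_alt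
  exact pvMain ((PySem.Str.split? text "\n").getD []) (pvLines_ne_nil text)
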